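-- pv_equiv track=rewrite | github.com/mediwind/PS_Algorithm | 프로그래머스/3/84021. 퍼즐 조각 채우기/퍼즐 조각 채우기.py | ground
-- ===== SOURCE A (Python) =====
-- def ground(arr):
--     x, y = list(zip(*arr))
--     row, col = max(x) - min(x) + 1, max(y) - min(y) + 1
--     board = [[0 for _ in range(col)] for _ in range(row)]
--
--     for i, j in arr:
--         i, j = i - min(x), j - min(y)
--         board[i][j] = 1
--
--     return board
-- ===== SOURCE B (Python) =====
-- def ground(arr):
--     x, y = zip(*arr)
--     min_x, min_y = min(x), min(y)
--     row, col = max(x) - min_x + 1, max(y) - min_y + 1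
--     s = set(map(tuple, arr))
--     return [[1 if (min_x + i, min_y + j) in s else 0 for j in range(col)]
--             for i in range(row)]
-- ===== Notes on version B (the rewrite author's own statement) =====
-- stated objective: idiomatic
-- what changed: Instead of zero-initializing a mutable board and scattering 1s over the point list (recomputing min(x)/min(y) per point), B builds a set of the coordinates once and constructs the grid in one nested comprehension over all row*col cells with a membership test.
-- outside the precondition, e.g. on ground([]): A raises ValueError, B raises ValueError
import Mathlib
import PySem

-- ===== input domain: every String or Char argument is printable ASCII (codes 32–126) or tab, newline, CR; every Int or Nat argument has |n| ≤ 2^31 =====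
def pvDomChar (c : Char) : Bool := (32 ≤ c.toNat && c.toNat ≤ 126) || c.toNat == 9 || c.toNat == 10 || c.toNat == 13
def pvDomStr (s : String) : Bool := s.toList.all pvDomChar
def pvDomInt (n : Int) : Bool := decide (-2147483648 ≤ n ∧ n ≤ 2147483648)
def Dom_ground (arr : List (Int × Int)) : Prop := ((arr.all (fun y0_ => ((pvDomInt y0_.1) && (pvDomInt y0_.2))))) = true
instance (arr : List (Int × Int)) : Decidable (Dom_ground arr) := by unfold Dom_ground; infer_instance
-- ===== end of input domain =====

-- B replaces scatter-writes into a zero board by a set of the points plus one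
-- nested comprehension over all cells (same values; different construction).

-- ===== PORT A =====
-- board[i][j] = v; exact while i, j are in range (they always are under Pre_ground:
-- indices are point - min, nonnegative and bounded by max - min).
def pySet2 (b : List (List Int)) (i j : Nat) (v : Int) : List (List Int) :=
  b.set i ((b.getD i []).set j v)

def ground (arr : List (Int × Int)) : List (List Int) :=
  let x := arr.map Prod.fst
  let y := arr.map Prod.snd
  let mnx := (PySem.List.min? x (fun v => v)).getD 0
  let mny := (PySem.List.min? y (fun v => v)).getD 0
  let row := (PySem.List.max? x (fun v => v)).getD 0 - mnx + 1
  let col := (PySem.List.max? y (fun v => v)).getD 0 - mny + 1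
  let board := List.replicate row.toNat (List.replicate col.toNat (0 : Int))
  arr.foldl (fun b pq => pySet2 b (pq.1 - mnx).toNat (pq.2 - mny).toNat 1) board

-- ===== PORT B =====
def ground_alt (arr : List (Int × Int)) : List (List Int) :=
  let x := arr.map Prod.fst
  let y := arr.map Prod.snd
  let mnx := (PySem.List.min? x (fun v => v)).getD 0
  let mny := (PySem.List.min? y (fun v => v)).getD 0
  let row := (PySem.List.max? x (fun v => v)).getD 0 - mnx + 1
  let col := (PySem.List.max? y (fun v => v)).getD 0 - mny + 1
  let s : PySem.Set (Int × Int) := PySem.Set.ofList arr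
  (List.range row.toNat).map (fun (i : Nat) =>
    (List.range col.toNat).map (fun (j : Nat) =>
      if PySem.Set.contains s ((mnx + (i : Int), mny + (j : Int)) : Int × Int) then (1 : Int) else 0))

-- ===== PRECONDITION & SPEC =====
-- Pre_ excludes only the empty list, on which A raises ValueError (zip(*[]) unpacking).
def Pre_ground (arr : List (Int × Int)) : Prop := arr ≠ []
instance (arr : List (Int × Int)) : Decidable (Pre_ground arr) := by unfold Pre_ground; infer_instance
def pvWitness_ground : (List (Int × Int)) := [(0, 0), (1, 2)]

def Spec_ground (arr : List (Int × Int)) (out : List (List Int)) : Prop := out = ground_alt arr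
instance (arr : List (Int × Int)) (out : List (List Int)) : Decidable (Spec_ground arr out) := by unfold Spec_ground; infer_instance

-- ===== CLAIM (what is proved, stated in full; the proofs are below) =====
def Claim_equal_ground : Prop := ∀ (arr : List (Int × Int)), Dom_ground arr → Pre_ground arr → Spec_ground arr (ground arr)

-- ===== LEMMAS AND PROOFS =====

-- one scatter write, observed through getD/getD
theorem pySet2_getD (b : List (List Int)) (i j i' j' : Nat)
    (hj : j < (b.getD i []).length) :
    ((pySet2 b i j 1).getD i' []).getD j' 0 =
      if i' = i ∧ j' = j then 1 else (b.getD i' []).getD j' 0 := by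
  have hi : i < b.length := by
    by_contra h
    rw [List.getD_eq_getElem?_getD, List.getElem?_eq_none (by omega)] at hj
    simp at hj
  rw [List.getD_eq_getElem?_getD] at hj
  unfold pySet2
  simp only [List.getD_eq_getElem?_getD, List.getElem?_set]
  by_cases hii : i = i'
  · subst hii
    rw [if_pos rfl, if_pos hi, Option.getD_some, List.getElem?_set]
    by_cases hjj : j' = j
    · subst hjj
      rw [if_pos rfl, if_pos hj, Option.getD_some, if_pos ⟨rfl, rfl⟩]
    · rw [if_neg (fun h => hjj h.symm), if_neg (by simp [hjj])]
  · rw [if_neg hii, if_neg (fun h => hii h.1.symm)]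

theorem pySet2_length (b : List (List Int)) (i j : Nat) :
    (pySet2 b i j 1).length = b.length := by
  simp [pySet2]

theorem pySet2_rows {c : Nat} (b : List (List Int)) (i j : Nat)
    (hb : ∀ r ∈ b, r.length = c) (hi : i < b.length) :
    ∀ r ∈ pySet2 b i j 1, r.length = c := by
  intro r hr
  rcases List.mem_or_eq_of_mem_set hr with h | h
  · exact hb r h
  · subst h
    rw [List.length_set]
    exact hb _ (by rw [List.getD_eq_getElem?_getD, List.getElem?_eq_getElem hi]
                   exact List.getElem_mem hi)

-- invariant for the scatter loop of A
theorem foldl_set2 (mnx mny : Int) (c : Nat) (l : List (Int × Int)) :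
    ∀ (b : List (List Int)),
    (∀ r ∈ b, r.length = c) →
    (∀ pq ∈ l, mnx ≤ pq.1 ∧ mny ≤ pq.2 ∧
        (pq.1 - mnx).toNat < b.length ∧ (pq.2 - mny).toNat < c) →
    ((l.foldl (fun b pq => pySet2 b (pq.1 - mnx).toNat (pq.2 - mny).toNat 1) b).length = b.length ∧
     (∀ r ∈ l.foldl (fun b pq => pySet2 b (pq.1 - mnx).toNat (pq.2 - mny).toNat 1) b, r.length = c) ∧
     ∀ i j : Nat, i < b.length → j < c →
       (((l.foldl (fun b pq => pySet2 b (pq.1 - mnx).toNat (pq.2 - mny).toNat 1) b).getD i []).getD j 0) =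
         if (mnx + (i : Int), mny + (j : Int)) ∈ l then 1
         else (b.getD i []).getD j 0) := by
  induction l with
  | nil => intro b hb _; exact ⟨rfl, hb, by intro i j _ _; simp⟩
  | cons pq t ih =>
    intro b hb hpts
    obtain ⟨h1, h2, h3, h4⟩ := hpts pq (List.mem_cons_self ..)
    have hrowlen : (b.getD (pq.1 - mnx).toNat []).length = c := by
      rw [List.getD_eq_getElem?_getD, List.getElem?_eq_getElem h3]
      exact hb _ (List.getElem_mem h3)
    have hb' : ∀ r ∈ pySet2 b (pq.1 - mnx).toNat (pq.2 - mny).toNat 1, r.length = c :=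
      pySet2_rows b _ _ hb h3
    have hlen' : (pySet2 b (pq.1 - mnx).toNat (pq.2 - mny).toNat 1).length = b.length :=
      pySet2_length b _ _
    have hpts' : ∀ p ∈ t, mnx ≤ p.1 ∧ mny ≤ p.2 ∧
        (p.1 - mnx).toNat < (pySet2 b (pq.1 - mnx).toNat (pq.2 - mny).toNat 1).length ∧
        (p.2 - mny).toNat < c := by
      intro p hp
      obtain ⟨a1, a2, a3, a4⟩ := hpts p (List.mem_cons_of_mem _ hp)
      exact ⟨a1, a2, by omega, a4⟩
    obtain ⟨ih1, ih2, ih3⟩ := ih _ hb' hpts'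
    refine ⟨by rw [List.foldl_cons, ih1, hlen'], by rw [List.foldl_cons]; exact ih2, ?_⟩
    intro i j hi hj
    rw [List.foldl_cons, ih3 i j (by omega) hj,
      pySet2_getD b _ _ i j (by rw [hrowlen]; exact h4)]
    by_cases hm : (mnx + (i : Int), mny + (j : Int)) ∈ t
    · simp [hm, List.mem_cons]
    · have hcond : ((mnx + (i : Int), mny + (j : Int)) = pq) ↔
          (i = (pq.1 - mnx).toNat ∧ j = (pq.2 - mny).toNat) := by
        constructor
        · intro h; rw [← h]; constructor <;> simp
        · rintro ⟨hh1, hh2⟩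
          have : (i : Int) = pq.1 - mnx := by omega
          have : (j : Int) = pq.2 - mny := by omega
          ext <;> simp <;> omega
      simp [hm, List.mem_cons, hcond]

theorem ground_eq_alt (arr : List (Int × Int)) (hne : arr ≠ []) :
    ground arr = ground_alt arr := by
  obtain ⟨mnx, hmnx⟩ : ∃ m, PySem.List.min? (arr.map Prod.fst) (fun v => v) = some m := by
    cases h : PySem.List.min? (arr.map Prod.fst) (fun v => v) with
    | none => exact absurd (by simpa using (PySem.List.min?_eq_none_iff _ _).mp h) hne
    | some m => exact ⟨m, rfl⟩
  obtain ⟨mny, hmny⟩ : ∃ m, PySem.List.min? (arr.map Prod.snd) (fun v => v) = some m := by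
    cases h : PySem.List.min? (arr.map Prod.snd) (fun v => v) with
    | none => exact absurd (by simpa using (PySem.List.min?_eq_none_iff _ _).mp h) hne
    | some m => exact ⟨m, rfl⟩
  obtain ⟨mxx, hmxx⟩ : ∃ m, PySem.List.max? (arr.map Prod.fst) (fun v => v) = some m := by
    cases h : PySem.List.max? (arr.map Prod.fst) (fun v => v) with
    | none => exact absurd (by simpa using (PySem.List.max?_eq_none_iff _ _).mp h) hne
    | some m => exact ⟨m, rfl⟩
  obtain ⟨mxy, hmxy⟩ : ∃ m, PySem.List.max? (arr.map Prod.snd) (fun v => v) = some m := by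
    cases h : PySem.List.max? (arr.map Prod.snd) (fun v => v) with
    | none => exact absurd (by simpa using (PySem.List.max?_eq_none_iff _ _).mp h) hne
    | some m => exact ⟨m, rfl⟩
  have hbnd : ∀ pq ∈ arr, mnx ≤ pq.1 ∧ pq.1 ≤ mxx ∧ mny ≤ pq.2 ∧ pq.2 ≤ mxy := by
    intro pq hpq
    refine ⟨PySem.List.min?_isMin hmnx _ (List.mem_map_of_mem hpq),
            PySem.List.max?_isMax hmxx _ (List.mem_map_of_mem hpq),
            PySem.List.min?_isMin hmny _ (List.mem_map_of_mem hpq),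
            PySem.List.max?_isMax hmxy _ (List.mem_map_of_mem hpq)⟩
  set r := (mxx - mnx + 1).toNat with hr
  set c := (mxy - mny + 1).toNat with hc
  have hb0 : ∀ row ∈ List.replicate r (List.replicate c (0 : Int)), row.length = c := by
    intro row hrow
    rw [List.eq_of_mem_replicate hrow, List.length_replicate]
  have hpts : ∀ pq ∈ arr, mnx ≤ pq.1 ∧ mny ≤ pq.2 ∧
      (pq.1 - mnx).toNat < (List.replicate r (List.replicate c (0 : Int))).length ∧
      (pq.2 - mny).toNat < c := by
    intro pq hpq
    obtain ⟨a1, a2, a3, a4⟩ := hbnd pq hpq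
    exact ⟨a1, a3, by rw [List.length_replicate]; omega, by omega⟩
  obtain ⟨f1, f2, f3⟩ := foldl_set2 mnx mny c arr _ hb0 hpts
  simp only [ground, ground_alt, hmnx, hmny, hmxx, hmxy, Option.getD_some]
  rw [← hr, ← hc]
  apply List.ext_getElem
  · rw [f1]; simp
  · intro i hi1 hi2
    have hir : i < r := by
      have := hi1; rw [f1, List.length_replicate] at this; exact this
    apply List.ext_getElem
    · have hlen := f2 _ (List.getElem_mem hi1)
      rw [hlen]
      simp
    · intro j hj1 hj2
      have hjc : j < c := by
        have := hj2; simp at this; exact this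
      have hcell := f3 i j (by rw [List.length_replicate]; exact hir) hjc
      simp only [List.getD_eq_getElem?_getD] at hcell
      rw [List.getElem?_eq_getElem hi1, Option.getD_some] at hcell
      rw [List.getElem?_eq_getElem hj1, Option.getD_some] at hcell
      have hz : (((List.replicate r (List.replicate c (0 : Int)))[i]?.getD [])[j]?.getD 0) = 0 := by
        simp [hir, hjc]
      rw [hz] at hcell
      simp only [List.getElem_map, List.getElem_range]
      rw [hcell]
      by_cases hm : (mnx + (i : Int), mny + (j : Int)) ∈ arr
      · simp [hm, PySem.Set.mem_ofList]
      · simp [hm, PySem.Set.mem_ofList]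

-- ===== VERDICT (by name: the statement is the Claim_ definition above) =====
theorem ground_spec : Claim_equal_ground := by
  intro arr _ hpre
  unfold Spec_ground
  exact ground_eq_alt arr hpre
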